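-- pv_equiv track=rewrite | github.com/sun912/rep-lit. | Recurssion/recursive_insertion_operator.py | go
-- ===== SOURCE A (Python) =====
-- def go(a,i,cur,plus,minus,mul,div):
--   res = []
--   if i == len(a):
--     return(cur,cur)
--   if plus > 0:
--     res.append(go(a,i+1,cur+a[i],plus-1,minus,mul,div))
--   if minus > 0:
--     res.append(go(a,i+1,cur-a[i],plus,minus-1,mul,div))
--   if mul > 0:
--     res.append(go(a,i+1,cur*a[i],plus,minus,mul-1,div))
--   if div > 0:
--     if cur >= 0:
--       res.append(go(a,i+1,cur//a[i],plus,minus,mul,div-1))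
--     else:
--       res.append(go(a,i+1,-(-cur//a[i]),plus,minus,mul,div-1))
--   ans =(
--           max([t[0] for t in res]),
--           min([t[1] for t in res])
--         )
--
--   return ans
-- ===== SOURCE B (Python) =====
-- def go(a, i, cur, plus, minus, mul, div):
--     # Iterative level-by-level expansion of the set of reachable states
--     # (deduplicated), instead of naive recursion over the operator tree.
--     n = len(a)
--     frontier = {(cur, plus, minus, mul, div)}
--     for j in range(i, n):
--         x = a[j]
--         nxt = set()
--         for (c, p, m, u, d) in frontier:
--             if p > 0:
--                 nxt.add((c + x, p - 1, m, u, d))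
--             if m > 0:
--                 nxt.add((c - x, p, m - 1, u, d))
--             if u > 0:
--                 nxt.add((c * x, p, m, u - 1, d))
--             if d > 0:
--                 q = c // x if c >= 0 else -((-c) // x)
--                 nxt.add((q, p, m, u, d - 1))
--         frontier = nxt
--     vals = [s[0] for s in frontier]
--     return (max(vals), min(vals))
-- ===== Notes on version B (the rewrite author's own statement) =====
-- stated objective: alternative
-- what changed: B replaces A's naive recursion over the operator-choice tree by an iterative level-by-level expansion of the deduplicated set of reachable states (cur, plus, minus, mul, div), taking max/min of the final frontier, so states reached by different operator orderings are processed once.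
import Mathlib
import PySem

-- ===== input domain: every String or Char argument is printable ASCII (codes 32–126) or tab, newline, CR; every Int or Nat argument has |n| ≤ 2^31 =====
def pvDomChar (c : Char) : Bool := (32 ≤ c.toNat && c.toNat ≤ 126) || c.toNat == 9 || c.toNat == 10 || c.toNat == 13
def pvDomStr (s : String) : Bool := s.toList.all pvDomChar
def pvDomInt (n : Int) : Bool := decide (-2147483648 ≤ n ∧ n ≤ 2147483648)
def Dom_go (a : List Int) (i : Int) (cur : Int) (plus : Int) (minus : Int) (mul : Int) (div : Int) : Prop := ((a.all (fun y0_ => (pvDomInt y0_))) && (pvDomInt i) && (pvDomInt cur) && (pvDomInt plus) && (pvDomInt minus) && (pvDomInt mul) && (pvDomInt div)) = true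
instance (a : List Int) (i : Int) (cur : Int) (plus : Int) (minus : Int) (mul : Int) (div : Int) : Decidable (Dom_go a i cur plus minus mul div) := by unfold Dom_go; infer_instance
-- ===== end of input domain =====

-- B replaces the naive recursion over the operator tree by an iterative
-- level-by-level expansion of the deduplicated set of reachable states.

-- ===== PORT A =====
-- fuel = number of remaining indices; Python recurses until i == len(a)
def goAux (a : List Int) : Nat → Int → Int → Int → Int → Int → Int → Int × Int
  | 0, _, cur, _, _, _, _ => (cur, cur)
  | f + 1, i, cur, plus, minus, mul, div =>
    let x := PySem.List.pyGetD a i 0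
    let res : List (Int × Int) :=
      (if plus > 0 then [goAux a f (i + 1) (cur + x) (plus - 1) minus mul div] else []) ++
      (if minus > 0 then [goAux a f (i + 1) (cur - x) plus (minus - 1) mul div] else []) ++
      (if mul > 0 then [goAux a f (i + 1) (cur * x) plus minus (mul - 1) div] else []) ++
      (if div > 0 then
        (if cur ≥ 0 then [goAux a f (i + 1) (PySem.Int.floordiv cur x) plus minus mul (div - 1)]
         else [goAux a f (i + 1) (-(PySem.Int.floordiv (-cur) x)) plus minus mul (div - 1)])
       else [])
    ((PySem.List.max? (res.map (fun t => t.1)) (fun y => y)).getD 0,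
     (PySem.List.min? (res.map (fun t => t.2)) (fun y => y)).getD 0)

def go (a : List Int) (i : Int) (cur : Int) (plus : Int) (minus : Int) (mul : Int) (div : Int) : Int × Int :=
  goAux a ((a.length : Int) - i).toNat i cur plus minus mul div

-- ===== PORT B =====
-- body of Source B's inner loop: conditionally add the successor states of s to nxt
def addChildren (x : Int) (nxt : PySem.Set (Int × Int × Int × Int × Int))
    (s : Int × Int × Int × Int × Int) : PySem.Set (Int × Int × Int × Int × Int) :=
  match s with
  | (c, p, m, u, d) =>
    let nxt := if p > 0 then PySem.Set.add nxt (c + x, p - 1, m, u, d) else nxt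
    let nxt := if m > 0 then PySem.Set.add nxt (c - x, p, m - 1, u, d) else nxt
    let nxt := if u > 0 then PySem.Set.add nxt (c * x, p, m, u - 1, d) else nxt
    let nxt := if d > 0 then
        PySem.Set.add nxt
          ((if c ≥ 0 then PySem.Int.floordiv c x else -(PySem.Int.floordiv (-c) x)),
           p, m, u, d - 1)
      else nxt
    nxt

def go_alt (a : List Int) (i : Int) (cur : Int) (plus : Int) (minus : Int) (mul : Int) (div : Int) : Int × Int :=
  let n : Int := a.length
  let frontier : PySem.Set (Int × Int × Int × Int × Int) :=
    (PySem.List.pyRange i n 1).foldl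
      (fun fr j => fr.foldl (addChildren (PySem.List.pyGetD a j 0)) PySem.Set.empty)
      (PySem.Set.ofList [(cur, plus, minus, mul, div)])
  let vals := frontier.map (fun s => s.1)
  ((PySem.List.max? vals (fun y => y)).getD 0, (PySem.List.min? vals (fun y => y)).getD 0)

-- ===== PRECONDITION & SPEC =====
-- Pre_ = exactly the inputs on which Python A returns: i in [-len a, len a] (else
-- IndexError / infinite recursion), positive operator budget covering the remaining
-- elements (else max([]) raises ValueError), and, when a division is available, no
-- zero among the elements the recursion can touch (else ZeroDivisionError).
def Pre_go (a : List Int) (i : Int) (cur : Int) (plus : Int) (minus : Int) (mul : Int) (div : Int) : Prop :=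
  -(a.length : Int) ≤ i ∧ i ≤ (a.length : Int) ∧
  (a.length : Int) - i ≤ max plus 0 + max minus 0 + max mul 0 + max div 0 ∧
  (0 < div → ∀ x ∈ a.drop i.toNat, x ≠ 0)
instance (a : List Int) (i : Int) (cur : Int) (plus : Int) (minus : Int) (mul : Int) (div : Int) : Decidable (Pre_go a i cur plus minus mul div) := by unfold Pre_go; infer_instance

def pvWitness_go : List Int × Int × Int × Int × Int × Int × Int := ([1, 2], 0, 0, 1, 1, 0, 0)

def Spec_go (a : List Int) (i : Int) (cur : Int) (plus : Int) (minus : Int) (mul : Int) (div : Int) (out : Int × Int) : Prop := out = go_alt a i cur plus minus mul div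
instance (a : List Int) (i : Int) (cur : Int) (plus : Int) (minus : Int) (mul : Int) (div : Int) (out : Int × Int) : Decidable (Spec_go a i cur plus minus mul div out) := by unfold Spec_go; infer_instance

-- ===== CLAIM (what is proved, stated in full; the proofs are below) =====
def Claim_equal_go : Prop := ∀ (a : List Int) (i : Int) (cur : Int) (plus : Int) (minus : Int) (mul : Int) (div : Int), Dom_go a i cur plus minus mul div → Pre_go a i cur plus minus mul div → Spec_go a i cur plus minus mul div (go a i cur plus minus mul div)

-- ===== LEMMAS AND PROOFS =====

-- the list of successor states of (c,p,m,u,d) reading element x, in A's branch order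
def children (x : Int) (s : Int × Int × Int × Int × Int) : List (Int × Int × Int × Int × Int) :=
  match s with
  | (c, p, m, u, d) =>
    (if p > 0 then [(c + x, p - 1, m, u, d)] else []) ++
    (if m > 0 then [(c - x, p, m - 1, u, d)] else []) ++
    (if u > 0 then [(c * x, p, m, u - 1, d)] else []) ++
    (if d > 0 then
      [((if c ≥ 0 then PySem.Int.floordiv c x else -(PySem.Int.floordiv (-c) x)), p, m, u, d - 1)]
     else [])

-- positive operator budget of a state
def posb (s : Int × Int × Int × Int × Int) : Int :=
  max s.2.1 0 + max s.2.2.1 0 + max s.2.2.2.1 0 + max s.2.2.2.2 0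

-- the cur values at the leaves of A's recursion tree, in A's order
def leaves (a : List Int) : Nat → Int → Int × Int × Int × Int × Int → List Int
  | 0, _, s => [s.1]
  | f + 1, i, s => (children (PySem.List.pyGetD a i 0) s).flatMap (leaves a f (i + 1))

def maxv (l : List Int) : Int := (PySem.List.max? l (fun y => y)).getD 0
def minv (l : List Int) : Int := (PySem.List.min? l (fun y => y)).getD 0

theorem children_posb (x : Int) (s t : Int × Int × Int × Int × Int)
    (ht : t ∈ children x s) : posb t = posb s - 1 := by
  obtain ⟨c, p, m, u, d⟩ := s
  simp only [children, List.mem_append] at ht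
  rcases ht with ((h | h) | h) | h <;> split at h <;>
    simp_all [posb] <;> omega

theorem children_ne_nil (x : Int) (s : Int × Int × Int × Int × Int)
    (h : 0 < posb s) : children x s ≠ [] := by
  obtain ⟨c, p, m, u, d⟩ := s
  simp only [posb] at h
  simp only [children, ne_eq, List.append_eq_nil_iff]
  intro hc
  rcases hc with ⟨⟨⟨h1, h2⟩, h3⟩, h4⟩
  split at h1 <;> split at h2 <;> split at h3 <;> split at h4 <;> simp_all

theorem leaves_ne_nil (a : List Int) : ∀ (f : Nat) (i : Int) (s : Int × Int × Int × Int × Int),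
    (f : Int) ≤ posb s → leaves a f i s ≠ [] := by
  intro f
  induction f with
  | zero => intro i s _; simp [leaves]
  | succ f ih =>
    intro i s h
    have hpos : 0 < posb s := by push_cast at h; omega
    have hc := children_ne_nil (PySem.List.pyGetD a i 0) s hpos
    simp only [leaves, ne_eq, List.flatMap_eq_nil_iff]
    intro hall
    obtain ⟨t, htmem⟩ := List.exists_mem_of_ne_nil _ hc
    exact ih (i + 1) t (by have := children_posb _ s t htmem; push_cast at h ⊢; omega)
      (hall t htmem)

theorem maxv_mem (l : List Int) (h : l ≠ []) : maxv l ∈ l := by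
  obtain ⟨v, hv⟩ := Option.ne_none_iff_exists'.mp
    (by simpa [PySem.List.max?_eq_none_iff] using h :
      PySem.List.max? l (fun y => y) ≠ none)
  simpa [maxv, hv] using PySem.List.max?_mem hv

theorem maxv_isMax (l : List Int) (h : l ≠ []) : ∀ y ∈ l, y ≤ maxv l := by
  obtain ⟨v, hv⟩ := Option.ne_none_iff_exists'.mp
    (by simpa [PySem.List.max?_eq_none_iff] using h :
      PySem.List.max? l (fun y => y) ≠ none)
  intro y hy
  simpa [maxv, hv] using PySem.List.max?_isMax hv y hy

theorem minv_mem (l : List Int) (h : l ≠ []) : minv l ∈ l := by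
  obtain ⟨v, hv⟩ := Option.ne_none_iff_exists'.mp
    (by simpa [PySem.List.min?_eq_none_iff] using h :
      PySem.List.min? l (fun y => y) ≠ none)
  simpa [minv, hv] using PySem.List.min?_mem hv

theorem minv_isMin (l : List Int) (h : l ≠ []) : ∀ y ∈ l, minv l ≤ y := by
  obtain ⟨v, hv⟩ := Option.ne_none_iff_exists'.mp
    (by simpa [PySem.List.min?_eq_none_iff] using h :
      PySem.List.min? l (fun y => y) ≠ none)
  intro y hy
  simpa [minv, hv] using PySem.List.min?_isMin hv y hy

theorem maxv_eq_of_mem_iff (l l' : List Int) (hl : l ≠ []) (hl' : l' ≠ [])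
    (h : ∀ y, y ∈ l ↔ y ∈ l') : maxv l = maxv l' := by
  exact le_antisymm
    (maxv_isMax l' hl' _ ((h _).mp (maxv_mem l hl)))
    (maxv_isMax l hl _ ((h _).mpr (maxv_mem l' hl')))

theorem minv_eq_of_mem_iff (l l' : List Int) (hl : l ≠ []) (hl' : l' ≠ [])
    (h : ∀ y, y ∈ l ↔ y ∈ l') : minv l = minv l' := by
  exact le_antisymm
    (minv_isMin l hl _ ((h _).mpr (minv_mem l' hl')))
    (minv_isMin l' hl' _ ((h _).mp (minv_mem l hl)))

theorem maxv_flatMap {α : Type} (l : List α) (g : α → List Int)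
    (hl : l ≠ []) (hg : ∀ x ∈ l, g x ≠ []) :
    maxv (l.flatMap g) = maxv (l.map fun x => maxv (g x)) := by
  have hflat : l.flatMap g ≠ [] := by
    simp only [ne_eq, List.flatMap_eq_nil_iff]
    intro hall
    obtain ⟨x, hx⟩ := List.exists_mem_of_ne_nil _ hl
    exact hg x hx (hall x hx)
  have hmap : l.map (fun x => maxv (g x)) ≠ [] := by simpa using hl
  apply le_antisymm
  · have h1 := maxv_mem _ hflat
    rw [List.mem_flatMap] at h1
    obtain ⟨x, hx, hmem⟩ := h1
    calc maxv (l.flatMap g) ≤ maxv (g x) := maxv_isMax _ (hg x hx) _ hmem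
      _ ≤ _ := maxv_isMax _ hmap _ (List.mem_map_of_mem hx)
  · have h2 := maxv_mem _ hmap
    rw [List.mem_map] at h2
    obtain ⟨x, hx, hval⟩ := h2
    rw [← hval]
    exact maxv_isMax _ hflat _ (List.mem_flatMap.mpr ⟨x, hx, maxv_mem _ (hg x hx)⟩)

theorem minv_flatMap {α : Type} (l : List α) (g : α → List Int)
    (hl : l ≠ []) (hg : ∀ x ∈ l, g x ≠ []) :
    minv (l.flatMap g) = minv (l.map fun x => minv (g x)) := by
  have hflat : l.flatMap g ≠ [] := by
    simp only [ne_eq, List.flatMap_eq_nil_iff]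
    intro hall
    obtain ⟨x, hx⟩ := List.exists_mem_of_ne_nil _ hl
    exact hg x hx (hall x hx)
  have hmap : l.map (fun x => minv (g x)) ≠ [] := by simpa using hl
  apply le_antisymm
  · have h2 := minv_mem _ hmap
    rw [List.mem_map] at h2
    obtain ⟨x, hx, hval⟩ := h2
    rw [← hval]
    exact minv_isMin _ hflat _ (List.mem_flatMap.mpr ⟨x, hx, minv_mem _ (hg x hx)⟩)
  · have h1 := minv_mem _ hflat
    rw [List.mem_flatMap] at h1
    obtain ⟨x, hx, hmem⟩ := h1
    calc minv (l.map fun x => minv (g x)) ≤ minv (g x) :=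
        minv_isMin _ hmap _ (List.mem_map_of_mem hx)
      _ ≤ _ := minv_isMin _ (hg x hx) _ hmem

theorem goAux_eq (a : List Int) : ∀ (f : Nat) (i c p m u d : Int),
    (f : Int) ≤ posb (c, p, m, u, d) →
    goAux a f i c p m u d =
      (maxv (leaves a f i (c, p, m, u, d)), minv (leaves a f i (c, p, m, u, d))) := by
  intro f
  induction f with
  | zero =>
    intro i c p m u d _
    simp [goAux, leaves, maxv, minv, PySem.List.max?_id_cons, PySem.List.min?_id_cons]
  | succ f ih =>
    intro i c p m u d h
    have hpos : 0 < posb (c, p, m, u, d) := by push_cast at h; omega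
    have hres :
        ((if p > 0 then [goAux a f (i+1) (c + PySem.List.pyGetD a i 0) (p-1) m u d] else []) ++
         (if m > 0 then [goAux a f (i+1) (c - PySem.List.pyGetD a i 0) p (m-1) u d] else []) ++
         (if u > 0 then [goAux a f (i+1) (c * PySem.List.pyGetD a i 0) p m (u-1) d] else []) ++
         (if d > 0 then
           (if c ≥ 0 then [goAux a f (i+1) (PySem.Int.floordiv c (PySem.List.pyGetD a i 0)) p m u (d-1)]
            else [goAux a f (i+1) (-(PySem.Int.floordiv (-c) (PySem.List.pyGetD a i 0))) p m u (d-1)])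
          else [])) =
        (children (PySem.List.pyGetD a i 0) (c, p, m, u, d)).map
          (fun t => goAux a f (i+1) t.1 t.2.1 t.2.2.1 t.2.2.2.1 t.2.2.2.2) := by
      simp only [children]
      split_ifs <;> simp
    have hcong :
        (children (PySem.List.pyGetD a i 0) (c, p, m, u, d)).map
          (fun t => goAux a f (i+1) t.1 t.2.1 t.2.2.1 t.2.2.2.1 t.2.2.2.2) =
        (children (PySem.List.pyGetD a i 0) (c, p, m, u, d)).map
          (fun t => (maxv (leaves a f (i+1) t), minv (leaves a f (i+1) t))) := by
      apply List.map_congr_left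
      intro t ht
      obtain ⟨tc, tp, tm, tu, td⟩ := t
      exact ih (i+1) tc tp tm tu td
        (by have := children_posb _ _ _ ht; push_cast at h ⊢; omega)
    have hcne := children_ne_nil (PySem.List.pyGetD a i 0) (c, p, m, u, d) hpos
    have hlne : ∀ t ∈ children (PySem.List.pyGetD a i 0) (c, p, m, u, d),
        leaves a f (i+1) t ≠ [] := by
      intro t ht
      exact leaves_ne_nil a f (i+1) t
        (by have := children_posb _ _ _ ht; push_cast at h ⊢; omega)
    show (let x := PySem.List.pyGetD a i 0;
      let res : List (Int × Int) :=
        (if p > 0 then [goAux a f (i + 1) (c + x) (p - 1) m u d] else []) ++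
        (if m > 0 then [goAux a f (i + 1) (c - x) p (m - 1) u d] else []) ++
        (if u > 0 then [goAux a f (i + 1) (c * x) p m (u - 1) d] else []) ++
        (if d > 0 then
          (if c ≥ 0 then [goAux a f (i + 1) (PySem.Int.floordiv c x) p m u (d - 1)]
           else [goAux a f (i + 1) (-(PySem.Int.floordiv (-c) x)) p m u (d - 1)])
         else [])
      ((PySem.List.max? (res.map (fun t => t.1)) (fun y => y)).getD 0,
       (PySem.List.min? (res.map (fun t => t.2)) (fun y => y)).getD 0)) = _
    simp only []
    rw [hres, hcong]
    have hleaf : leaves a (f+1) i (c, p, m, u, d) =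
        (children (PySem.List.pyGetD a i 0) (c, p, m, u, d)).flatMap (leaves a f (i+1)) := rfl
    rw [Prod.mk.injEq]
    constructor
    · show maxv (List.map _ (List.map _ _)) = _
      rw [List.map_map, hleaf, maxv_flatMap _ _ hcne hlne]
      rfl
    · show minv (List.map _ (List.map _ _)) = _
      rw [List.map_map, hleaf, minv_flatMap _ _ hcne hlne]
      rfl

-- B-side: the frontier after the fold has the same members as the flatMap levels
theorem mem_addChildren (x : Int) (nxt : PySem.Set (Int × Int × Int × Int × Int))
    (s t : Int × Int × Int × Int × Int) :
    t ∈ addChildren x nxt s ↔ t ∈ nxt ∨ t ∈ children x s := by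
  obtain ⟨c, p, m, u, d⟩ := s
  simp only [addChildren, children]
  split_ifs <;> simp [PySem.Set.mem_add] <;> tauto

theorem mem_foldl_addChildren (x : Int) :
    ∀ (fr acc : List (Int × Int × Int × Int × Int)) (t : Int × Int × Int × Int × Int),
    t ∈ fr.foldl (addChildren x) acc ↔ t ∈ acc ∨ ∃ s ∈ fr, t ∈ children x s := by
  intro fr
  induction fr with
  | nil => intro acc t; simp
  | cons s fr ih =>
    intro acc t
    rw [List.foldl_cons, ih, mem_addChildren]
    simp only [List.mem_cons]
    constructor
    · rintro ((h | h) | ⟨s', hs', h⟩)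
      · exact Or.inl h
      · exact Or.inr ⟨s, Or.inl rfl, h⟩
      · exact Or.inr ⟨s', Or.inr hs', h⟩
    · rintro (h | ⟨s', (rfl | hs'), h⟩)
      · exact Or.inl (Or.inl h)
      · exact Or.inl (Or.inr h)
      · exact Or.inr ⟨s', hs', h⟩

-- the same levels, computed as A's recursion layers
def statesAfter (a : List Int) : Nat → Int → List (Int × Int × Int × Int × Int) → List (Int × Int × Int × Int × Int)
  | 0, _, ss => ss
  | f + 1, i, ss => statesAfter a f (i + 1) (ss.flatMap (children (PySem.List.pyGetD a i 0)))

theorem leaves_states (a : List Int) : ∀ (f : Nat) (i : Int) (ss : List (Int × Int × Int × Int × Int)),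
    ss.flatMap (leaves a f i) = (statesAfter a f i ss).map (fun s => s.1) := by
  intro f
  induction f with
  | zero =>
    intro i ss
    simp [statesAfter, leaves]
    induction ss with
    | nil => simp
    | cons s ss ihs => simp [ihs]
  | succ f ih =>
    intro i ss
    have : ss.flatMap (leaves a (f+1) i) =
        (ss.flatMap (children (PySem.List.pyGetD a i 0))).flatMap (leaves a f (i+1)) := by
      rw [List.flatMap_assoc]
      rfl
    rw [this, statesAfter, ih]

theorem mem_outer (a : List Int) :
    ∀ (js : List Int) (fr ss : List (Int × Int × Int × Int × Int)),
    (∀ t, t ∈ fr ↔ t ∈ ss) → ∀ t,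
    (t ∈ js.foldl (fun fr j => fr.foldl (addChildren (PySem.List.pyGetD a j 0)) PySem.Set.empty) fr ↔
     t ∈ js.foldl (fun ss j => ss.flatMap (children (PySem.List.pyGetD a j 0))) ss) := by
  intro js
  induction js with
  | nil => intro fr ss h t; simpa using h t
  | cons j js ih =>
    intro fr ss h t
    simp only [List.foldl_cons]
    apply ih
    intro t'
    rw [mem_foldl_addChildren, List.mem_flatMap]
    simp only [PySem.Set.empty, List.not_mem_nil, false_or]
    constructor
    · rintro ⟨s, hs, hc⟩; exact ⟨s, (h s).mp hs, hc⟩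
    · rintro ⟨s, hs, hc⟩; exact ⟨s, (h s).mpr hs, hc⟩

theorem statesAfter_eq_foldl (a : List Int) :
    ∀ (f : Nat) (i : Int) (ss : List (Int × Int × Int × Int × Int)),
    ((a.length : Int) - i).toNat = f →
    statesAfter a f i ss =
      (PySem.List.pyRange i (a.length : Int) 1).foldl
        (fun ss j => ss.flatMap (children (PySem.List.pyGetD a j 0))) ss := by
  intro f
  induction f with
  | zero =>
    intro i ss h
    rw [PySem.List.pyRange_one_eq_nil (by omega)]
    rfl
  | succ f ih =>
    intro i ss h
    rw [PySem.List.pyRange_one_cons (by omega)]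
    rw [List.foldl_cons]
    exact ih (i + 1) _ (by omega)

-- ===== VERDICT (by name: the statement is the Claim_ definition above) =====
theorem go_spec : Claim_equal_go := by
  intro a i cur plus minus mul div _hdom hpre
  obtain ⟨h1, h2, h3, _h4⟩ := hpre
  unfold Spec_go go go_alt
  have hbudget : (((a.length : Int) - i).toNat : Int) ≤ posb (cur, plus, minus, mul, div) := by
    simp only [posb]
    omega
  rw [goAux_eq a _ i cur plus minus mul div hbudget]
  simp only []
  -- frontier vs levels
  have hmem := mem_outer a (PySem.List.pyRange i (a.length : Int) 1)
    (PySem.Set.ofList [(cur, plus, minus, mul, div)]) [(cur, plus, minus, mul, div)]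
    (fun t => by simp [PySem.Set.ofList, PySem.Set.add, PySem.Set.empty, PySem.Set.contains])
  have hstates := statesAfter_eq_foldl a (((a.length : Int) - i).toNat) i
    [(cur, plus, minus, mul, div)] rfl
  have hleaf : leaves a (((a.length : Int) - i).toNat) i (cur, plus, minus, mul, div) =
      (statesAfter a (((a.length : Int) - i).toNat) i [(cur, plus, minus, mul, div)]).map
        (fun s => s.1) := by
    rw [← leaves_states]
    simp
  have hlne : leaves a (((a.length : Int) - i).toNat) i (cur, plus, minus, mul, div) ≠ [] :=
    leaves_ne_nil a _ i _ hbudget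
  set F := (PySem.List.pyRange i (a.length : Int) 1).foldl
      (fun fr j => fr.foldl (addChildren (PySem.List.pyGetD a j 0)) PySem.Set.empty)
      (PySem.Set.ofList [(cur, plus, minus, mul, div)]) with hF
  set S := statesAfter a (((a.length : Int) - i).toNat) i [(cur, plus, minus, mul, div)] with hS
  have hmemFS : ∀ t, t ∈ F ↔ t ∈ S := by
    intro t
    rw [hstates]
    exact hmem t
  have hSne : S ≠ [] := by
    intro hnil
    rw [hleaf, hnil] at hlne
    exact hlne rfl
  have hFne : F ≠ [] := by
    obtain ⟨t, ht⟩ := List.exists_mem_of_ne_nil _ hSne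
    intro hnil
    have := (hmemFS t).mpr ht
    rw [hnil] at this
    exact List.not_mem_nil this
  have hvalmem : ∀ y, y ∈ F.map (fun s => s.1) ↔
      y ∈ leaves a (((a.length : Int) - i).toNat) i (cur, plus, minus, mul, div) := by
    intro y
    rw [hleaf]
    simp only [List.mem_map]
    exact ⟨fun ⟨t, ht, hy⟩ => ⟨t, (hmemFS t).mp ht, hy⟩,
           fun ⟨t, ht, hy⟩ => ⟨t, (hmemFS t).mpr ht, hy⟩⟩
  have hvne : F.map (fun s => s.1) ≠ [] := by simpa using hFne
  rw [Prod.mk.injEq]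
  exact ⟨maxv_eq_of_mem_iff _ _ hlne hvne (fun y => (hvalmem y).symm),
         minv_eq_of_mem_iff _ _ hlne hvne (fun y => (hvalmem y).symm)⟩
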